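-- pv_equiv track=rewrite | github.com/AlexandraVolentir/Python-Homeworks-2022 | HW2/main.py | exercise9
-- ===== SOURCE A (Python) =====
-- def is_digit(number):
--     if not isinstance(number, int):
--         return False
--     return True
--
-- def check_if_a_list_contains_numbers(ls):
--     return [s for s in ls if is_digit(s)]
--
-- def exercise9(matrix):
--     for elm in matrix:
--         if not check_if_a_list_contains_numbers(elm):
--             return "Invalid matrix. Only numbers allowed"
--
--     result = []
--     for col in range(len(matrix[0])):
--         max_height = matrix[0][col]
--         for line in range(1, len(matrix)):
--             if matrix[line][col] > max_height:
--                 max_height = matrix[line][col]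
--             else:
--                 result.append((line, col))
--     return result
-- ===== SOURCE B (Python) =====
-- def exercise9(matrix):
--     if not all(any(isinstance(x, int) for x in row) for row in matrix):
--         return "Invalid matrix. Only numbers allowed"
--     width = len(matrix[0])
--     # phase 1: per-column inclusive prefix-maxima table
--     pref = [matrix[0][:width]]
--     for row in matrix[1:]:
--         pref.append([max(p, v) for p, v in zip(pref[-1], row)])
--     # phase 2: collect positions not exceeding the running column max above them
--     return [(line, col)
--             for col in range(width)
--             for line in range(1, len(matrix))
--             if matrix[line][col] <= pref[line - 1][col]]
-- ===== Notes on version B (the rewrite author's own statement) =====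
-- stated objective: alternative
-- what changed: Instead of A's single interleaved column scan that mutates a running max while appending, B first materializes a per-column inclusive prefix-maxima table (phase 1) and then collects positions in a separate comprehension comparing each cell against the table entry above it (phase 2).
-- outside the precondition, e.g. on exercise9([[1, 2], [3]]): A raises IndexError, B raises IndexError
import Mathlib
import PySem

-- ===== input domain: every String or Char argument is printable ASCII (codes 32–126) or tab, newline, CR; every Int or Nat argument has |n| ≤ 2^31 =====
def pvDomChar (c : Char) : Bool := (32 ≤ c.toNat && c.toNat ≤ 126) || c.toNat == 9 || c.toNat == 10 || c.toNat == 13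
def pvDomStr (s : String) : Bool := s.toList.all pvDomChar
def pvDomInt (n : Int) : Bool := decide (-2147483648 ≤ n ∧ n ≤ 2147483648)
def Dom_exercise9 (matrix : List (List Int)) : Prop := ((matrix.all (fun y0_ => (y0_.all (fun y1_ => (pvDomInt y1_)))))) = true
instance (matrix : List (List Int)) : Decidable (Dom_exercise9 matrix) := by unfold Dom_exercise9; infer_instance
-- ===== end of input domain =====

-- B replaces A's interleaved running-max scan by a two-phase algorithm (prefix-maxima table, then a
-- collection pass); same asymptotic cost, alternative decomposition.


-- ===== PORT A =====
def is_digit (_number : Int) : Bool := true   -- isinstance(number, int) is always true on the Int domain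

def check_if_a_list_contains_numbers (ls : List Int) : List Int :=
  ls.filter (fun s => is_digit s)

def exercise9 (matrix : List (List Int)) : List (Int × Int) :=
  if matrix.any (fun elm => (check_if_a_list_contains_numbers elm).isEmpty) then
    []  -- the Python returns the string "Invalid matrix. Only numbers allowed" here (not of the declared type); Pre_ excludes it
  else
    (List.range (matrix.headD []).length).foldl (fun result col =>
      ((List.range' 1 (matrix.length - 1)).foldl
        (fun (st : Int × List (Int × Int)) line =>
          if ((matrix.getD line []).getD col 0) > st.1 then
            (((matrix.getD line []).getD col 0), st.2)
          else
            (st.1, st.2 ++ [((line : Int), (col : Int))]))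
        (((matrix.headD []).getD col 0), result)).2) []

-- ===== PORT B =====
-- phase 1 loop of Source B: `for row in matrix[1:]: pref.append([max(p, v) for p, v in zip(pref[-1], row)])`
-- (the recursion carries `last`, which is exactly Python's pref[-1])
def buildPref (last : List Int) : List (List Int) → List (List Int)
  | [] => []
  | row :: rest =>
    let new := List.zipWith (fun p v => max p v) last row
    new :: buildPref new rest

def exercise9_alt (matrix : List (List Int)) : List (Int × Int) :=
  if !(matrix.all (fun row => row.any (fun _x => true))) then
    []  -- the Python returns the string "Invalid matrix. Only numbers allowed" here; Pre_ excludes it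
  else
    let width := (matrix.headD []).length
    let first := (matrix.headD []).take width
    let pref := first :: buildPref first (matrix.drop 1)
    (List.range width).flatMap (fun col =>
      (List.range' 1 (matrix.length - 1)).filterMap (fun line =>
        if (matrix.getD line []).getD col 0 ≤ (pref.getD (line - 1) []).getD col 0
        then some ((line : Int), (col : Int)) else none))

-- ===== PRECONDITION & SPEC =====
-- Pre_ excludes: matrices with an empty row or an empty matrix, where A returns a validation STRING
-- (not a value of the declared List (Int × Int) type), and ragged matrices with a row shorter than
-- row 0, where A raises IndexError.
def Pre_exercise9 (matrix : List (List Int)) : Prop :=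
  matrix ≠ [] ∧ (matrix.headD []) ≠ [] ∧ ∀ row ∈ matrix, (matrix.headD []).length ≤ row.length

instance (matrix : List (List Int)) : Decidable (Pre_exercise9 matrix) := by
  unfold Pre_exercise9; infer_instance

def pvWitness_exercise9 : List (List Int) := [[1, 2], [0, 3]]

def Spec_exercise9 (matrix : List (List Int)) (out : List (Int × Int)) : Prop := out = exercise9_alt matrix
instance (matrix : List (List Int)) (out : List (Int × Int)) : Decidable (Spec_exercise9 matrix out) := by unfold Spec_exercise9; infer_instance

-- ===== CLAIM (what is proved, stated in full; the proofs are below) =====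
def Claim_equal_exercise9 : Prop := ∀ (matrix : List (List Int)), Dom_exercise9 matrix → Pre_exercise9 matrix → Spec_exercise9 matrix (exercise9 matrix)

-- ===== LEMMAS AND PROOFS =====

-- the inclusive prefix maximum of column `col` over rows 0..k
def pmax (matrix : List (List Int)) (col : Nat) : Nat → Int
  | 0 => (matrix.getD 0 []).getD col 0
  | (k+1) => max (pmax matrix col k) ((matrix.getD (k+1) []).getD col 0)

lemma headD_eq_getD (l : List (List Int)) : l.headD [] = l.getD 0 [] := by
  cases l <;> simp

-- A's inner loop, generalized: running max = g, chained by max along the index list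
lemma innerA (val : Nat → Int) (g : Nat → Int) (col : Int) :
    ∀ (k a : Nat) (res : List (Int × Int)),
    (∀ i, a ≤ i → g (i+1) = max (g i) (val i)) →
    ((List.range' a k).foldl
      (fun (st : Int × List (Int × Int)) line =>
        if val line > st.1 then (val line, st.2)
        else (st.1, st.2 ++ [((line : Int), col)]))
      (g a, res)).2
    = res ++ (List.range' a k).filterMap (fun line =>
        if val line ≤ g line then some ((line : Int), col) else none) := by
  intro k
  induction k with
  | zero => intro a res _; simp
  | succ k ih =>
    intro a res hg
    rw [List.range'_succ]
    simp only [List.foldl_cons, List.filterMap_cons]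
    by_cases h : val a > g a
    · rw [if_pos h, if_neg (by omega)]
      have hst : val a = g (a+1) := by
        rw [hg a (le_refl a)]; omega
      rw [hst, ih (a+1) res (fun i hi => hg i (by omega))]
    · rw [if_neg h, if_pos (by omega)]
      have hst : g a = g (a+1) := by
        rw [hg a (le_refl a)]; omega
      rw [hst, ih (a+1) (res ++ [((a : Int), col)]) (fun i hi => hg i (by omega))]
      simp

lemma foldl_flatMap {α β : Type} (F : List β → α → List β) (h : α → List β)
    (hF : ∀ res a, F res a = res ++ h a) :
    ∀ (l : List α) (res : List β), l.foldl F res = res ++ l.flatMap h := by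
  intro l
  induction l with
  | nil => intro res; simp
  | cons x xs ih => intro res; simp [hF res x, ih, List.append_assoc]

lemma flatMap_congr_mem {α β : Type} (l : List α) (f g : α → List β)
    (h : ∀ a ∈ l, f a = g a) : l.flatMap f = l.flatMap g := by
  induction l with
  | nil => simp
  | cons x xs ih =>
    simp only [List.flatMap_cons]
    rw [h x (by simp), ih (fun a ha => h a (List.mem_cons_of_mem _ ha))]

lemma filterMap_congr_mem {α β : Type} (l : List α) (f g : α → Option β)
    (h : ∀ a ∈ l, f a = g a) : l.filterMap f = l.filterMap g := by
  induction l with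
  | nil => simp
  | cons x xs ih =>
    simp only [List.filterMap_cons]
    rw [h x (by simp), ih (fun a ha => h a (List.mem_cons_of_mem _ ha))]

lemma buildPref_getD (col : Nat) :
    ∀ (rest : List (List Int)) (last : List Int) (i : Nat),
    i < rest.length →
    (∀ row ∈ rest, col < row.length) →
    col < last.length →
    ((buildPref last rest).getD i []).getD col 0
      = (rest.take (i+1)).foldl (fun m row => max m (row.getD col 0)) (last.getD col 0) := by
  intro rest
  induction rest with
  | nil => intro last i hi; simp at hi
  | cons row rest' ih =>
    intro last i hi hrows hlast
    have hrow : col < row.length := hrows row (by simp)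
    have hnew : col < (List.zipWith (fun p v => max p v) last row).length := by
      simp [List.length_zipWith]; omega
    have hget : (List.zipWith (fun p v => max p v) last row).getD col 0
        = max (last.getD col 0) (row.getD col 0) := by
      rw [List.getD_eq_getElem _ _ hnew, List.getD_eq_getElem _ _ hlast,
          List.getD_eq_getElem _ _ hrow, List.getElem_zipWith]
    cases i with
    | zero =>
      simp only [buildPref, List.getD_cons_zero, List.take_succ_cons, List.take_zero,
        List.foldl_cons, List.foldl_nil]
      exact hget
    | succ i' =>
      simp only [buildPref, List.getD_cons_succ, List.take_succ_cons, List.foldl_cons]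
      rw [ih _ i' (by simpa using hi) (fun r hr => hrows r (by simp [hr])) hnew, hget]

lemma pmax_eq_fold (matrix : List (List Int)) (col : Nat) :
    ∀ k, k < matrix.length →
    pmax matrix col k
      = ((matrix.drop 1).take k).foldl (fun m row => max m (row.getD col 0))
          ((matrix.getD 0 []).getD col 0) := by
  intro k
  induction k with
  | zero => intro _; simp [pmax]
  | succ k ih =>
    intro hk
    have hlen : k < (matrix.drop 1).length := by
      simp; omega
    rw [List.take_add_one, List.getElem?_eq_getElem hlen]
    simp only [Option.toList_some]
    rw [List.foldl_append, ← ih (by omega)]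
    simp only [pmax, List.foldl_cons, List.foldl_nil]
    congr 1
    rw [List.getElem_drop, List.getD_eq_getElem _ _ (show k + 1 < matrix.length by omega)]
    simp [Nat.add_comm]

-- ===== VERDICT (by name: the statement is the Claim_ definition above) =====
theorem exercise9_spec : Claim_equal_exercise9 := by
  intro matrix _hdom hpre
  obtain ⟨hne, hrow0, hlong⟩ := hpre
  unfold Spec_exercise9 exercise9 exercise9_alt
  -- every row is nonempty
  have hrows_ne : ∀ row ∈ matrix, row ≠ [] := by
    intro row hr
    have := hlong row hr
    have h0 : 0 < (matrix.headD []).length := List.length_pos_of_ne_nil hrow0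
    intro hcontra; subst hcontra
    rw [List.length_nil, Nat.le_zero] at this
    omega
  -- both validation guards take the else branch
  have hA : (matrix.any (fun elm => (check_if_a_list_contains_numbers elm).isEmpty)) = false := by
    rw [List.any_eq_false]
    intro row hr
    simp [check_if_a_list_contains_numbers, is_digit, List.isEmpty_iff]
    exact hrows_ne row hr
  have hB : (!(matrix.all (fun row => row.any (fun _x => true)))) = false := by
    simp only [Bool.not_eq_false', List.all_eq_true]
    intro row hr
    rw [List.any_eq_true]
    rcases List.exists_mem_of_ne_nil row (hrows_ne row hr) with ⟨x, hx⟩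
    exact ⟨x, hx, rfl⟩
  rw [hA, hB]
  simp only [if_false, Bool.false_eq_true]
  set width := (matrix.headD []).length with hw
  set first := (matrix.headD []).take width with hf
  have hfirst : first = matrix.headD [] := by rw [hf, hw, List.take_length]
  -- the outer fold is a flatMap of the per-column inner folds
  rw [foldl_flatMap _
      (fun col => (List.range' 1 (matrix.length - 1)).filterMap (fun line =>
          if (matrix.getD line []).getD col 0 ≤ pmax matrix col (line - 1)
          then some ((line : Int), (col : Int)) else none))
      (by
        intro res col
        have hg : ∀ i, 1 ≤ i →
            (fun line => pmax matrix col (line - 1)) (i+1)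
              = max ((fun line => pmax matrix col (line - 1)) i)
                  ((fun line => (matrix.getD line []).getD col 0) i) := by
          intro i hi
          simp only
          have : i + 1 - 1 = (i - 1) + 1 := by omega
          rw [this, pmax]
          have : i - 1 + 1 = i := by omega
          rw [this]
        have hinit : (matrix.headD []).getD col 0 = pmax matrix col 0 := by
          simp only [pmax]
          rw [headD_eq_getD]
        rw [hinit]
        exact innerA (fun line => (matrix.getD line []).getD col 0)
          (fun line => pmax matrix col (line - 1)) (col : Int)
          (matrix.length - 1) 1 res hg)]
  simp only [List.nil_append]
  -- per column, the two filterMap conditions agree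
  apply flatMap_congr_mem
  intro col hcol
  have hcolw : col < width := by
    rw [hw]; exact List.mem_range.mp hcol
  apply filterMap_congr_mem
  intro line hline
  have hline' : 1 ≤ line ∧ line < matrix.length := by
    have := List.mem_range'.mp hline
    obtain ⟨i, hi, heq⟩ := this
    have hmlen : 0 < matrix.length := List.length_pos_of_ne_nil hne
    omega
  -- the prefix table entry equals pmax
  have hpref : (((first :: buildPref first (matrix.drop 1)).getD (line - 1) []).getD col 0)
      = pmax matrix col (line - 1) := by
    rcases Nat.eq_or_lt_of_le hline'.1 with h1 | h2
    · -- line = 1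
      rw [← h1]
      simp only [Nat.sub_self, List.getD_cons_zero, hfirst, pmax]
      rw [headD_eq_getD]
    · -- line ≥ 2
      have hl2 : 2 ≤ line := h2
      have hidx : line - 1 = (line - 2) + 1 := by omega
      rw [hidx, List.getD_cons_succ]
      have hcf : col < first.length := by rw [hfirst]; exact hcolw
      have hrest : ∀ row ∈ matrix.drop 1, col < row.length := by
        intro row hr
        have : row ∈ matrix := List.mem_of_mem_drop hr
        have := hlong row this
        omega
      have hilen : line - 2 < (matrix.drop 1).length := by
        simp; omega
      rw [buildPref_getD col (matrix.drop 1) first (line - 2) hilen hrest hcf]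
      have : line - 2 + 1 = line - 1 := by omega
      rw [this, hfirst, headD_eq_getD]
      rw [pmax_eq_fold matrix col (line - 1) (by omega)]
  rw [hpref]
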